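-- pv_equiv track=rewrite | github.com/BurritoSpray/GSBoard | gsboard/input/windows.py | _tokenize_shortcut
-- ===== SOURCE A (Python) =====
-- from typing import Callable, Dict, Optional, Tuple
--
-- def _tokenize_shortcut(shortcut: str) -> Optional[list]:
--     """Split a pynput-style shortcut into tokens without confusing the "+"
--     separator with a literal "+" key (e.g. ``<ctrl>++`` is Ctrl+Plus)."""
--     s = shortcut.lower()
--     tokens: list = []
--     i, n = 0, len(s)
--     while i < n:
--         if s[i] == "<":
--             j = s.find(">", i)
--             if j < 0:
--                 return None
--             tokens.append(s[i + 1 : j].strip())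
--             i = j + 1
--             if i < n and s[i] == "+":
--                 i += 1  # separator after a wrapped modifier/key
--         elif s[i] == "+":
--             tokens.append("+")  # literal "+" key — prior char was a separator
--             i += 1
--         else:
--             j = s.find("+", i)
--             if j < 0:
--                 tokens.append(s[i:].strip())
--                 break
--             tokens.append(s[i:j].strip())
--             i = j + 1
--     return [t for t in tokens if t]
-- ===== SOURCE B (Python) =====
-- def _tokenize_shortcut(shortcut):
--     """Single-pass state-machine tokenizer: states START/AFTER (token boundary),
--     NORM (inside a plain run), BRACK (inside <...>)."""
--     tokens = []
--     state = 'START'   # START: boundary where '+' is a literal key; AFTER: boundary just after '>', where one '+' is a separator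
--     buf = []
--     for c in shortcut.lower():
--         if state == 'BRACK':
--             if c == '>':
--                 tokens.append(''.join(buf).strip())
--                 state = 'AFTER'
--             else:
--                 buf.append(c)
--         elif state == 'NORM':
--             if c == '+':
--                 tokens.append(''.join(buf).strip())
--                 state = 'START'
--             else:
--                 buf.append(c)
--         else:  # START or AFTER
--             if c == '<':
--                 state = 'BRACK'
--                 buf = []
--             elif c == '+':
--                 if state == 'START':
--                     tokens.append('+')
--                 state = 'START'
--             else:
--                 state = 'NORM'
--                 buf = [c]
--     if state == 'BRACK':
--         return None  # unclosed '<'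
--     if state == 'NORM':
--         tokens.append(''.join(buf).strip())
--     return [t for t in tokens if t]
-- ===== Notes on version B (the rewrite author's own statement) =====
-- stated objective: alternative
-- what changed: A's index-jumping while loop (repeated str.find calls plus slicing, with manual index arithmetic) is replaced by a single left-to-right pass: a 4-state character state machine (boundary / after-bracket / plain run / inside brackets) that folds over the string once and accumulates the current token in a buffer.
import Mathlib
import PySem

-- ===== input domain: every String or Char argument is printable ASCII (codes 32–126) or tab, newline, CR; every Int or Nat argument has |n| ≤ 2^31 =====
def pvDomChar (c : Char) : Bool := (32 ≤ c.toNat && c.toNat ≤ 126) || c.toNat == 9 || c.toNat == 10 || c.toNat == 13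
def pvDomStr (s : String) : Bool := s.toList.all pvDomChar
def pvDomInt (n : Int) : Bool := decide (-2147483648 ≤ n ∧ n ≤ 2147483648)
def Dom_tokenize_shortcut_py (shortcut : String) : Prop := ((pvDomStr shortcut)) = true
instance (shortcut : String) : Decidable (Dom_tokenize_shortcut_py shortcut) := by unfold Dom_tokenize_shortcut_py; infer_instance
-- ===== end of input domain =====

-- B replaces A's index-jumping while loop (str.find + slicing) by a single-pass
-- 4-state character state machine (objective: alternative algorithm, same cost).

-- shared final step: both Pythons end with the same literal `[t for t in tokens if t]`
def pvFinishTokens (ts : List (List Char)) : List String :=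
  (ts.filter (fun t => !t.isEmpty)).map String.ofList

-- ===== PORT A =====
-- the `while i < n` loop of A, transliterated (indices, str.find from i, slices)
def pyLoopA (s : List Char) (i : Nat) (acc : List (List Char)) : Option (List (List Char)) :=
  if h : i < s.length then
    if s[i] = '<' then
      if hj : PySem.Chars.findFrom s ['>'] (i : Int) < 0 then none
      else
        let acc' := acc ++ [PySem.Chars.strip (PySem.List.slice s (some ((i : Int) + 1)) (some (PySem.Chars.findFrom s ['>'] (i : Int))))]
        let i' := (PySem.Chars.findFrom s ['>'] (i : Int)).toNat + 1
        if h2 : i' < s.length then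
          if s[i'] = '+' then pyLoopA s (i' + 1) acc'  -- separator after a wrapped modifier/key
          else pyLoopA s i' acc'
        else pyLoopA s i' acc'
    else if s[i] = '+' then
      pyLoopA s (i + 1) (acc ++ [['+']])  -- literal "+" key
    else
      if hj : PySem.Chars.findFrom s ['+'] (i : Int) < 0 then
        some (acc ++ [PySem.Chars.strip (PySem.List.slice s (some (i : Int)) none)])
      else
        pyLoopA s ((PySem.Chars.findFrom s ['+'] (i : Int)).toNat + 1)
          (acc ++ [PySem.Chars.strip (PySem.List.slice s (some (i : Int)) (some (PySem.Chars.findFrom s ['+'] (i : Int))))])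
  else some acc
termination_by s.length - i
decreasing_by
  · have hs := PySem.Chars.findFrom_natCast_spec s ['>'] i (Nat.le_of_lt h) (by omega)
    omega
  · have hs := PySem.Chars.findFrom_natCast_spec s ['>'] i (Nat.le_of_lt h) (by omega)
    omega
  · omega
  · omega
  · have hs := PySem.Chars.findFrom_natCast_spec s ['+'] i (Nat.le_of_lt h) (by omega)
    omega

def tokenize_shortcut_py (shortcut : String) : Option (List String) :=
  match pyLoopA (PySem.Chars.lower shortcut.toList) 0 [] with
  | none => none
  | some ts => some (pvFinishTokens ts)

-- ===== PORT B =====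
inductive PvState : Type
  | start  -- token boundary where '+' is a literal key
  | after  -- boundary just after '>', where one '+' is a separator
  | norm   -- inside a plain run
  | brack  -- inside <...>
deriving DecidableEq, Repr

def pvStep (st : List (List Char) × PvState × List Char) (c : Char) :
    List (List Char) × PvState × List Char :=
  match st with
  | (acc, .brack, buf) =>
      if c = '>' then (acc ++ [PySem.Chars.strip buf], .after, []) else (acc, .brack, buf ++ [c])
  | (acc, .norm, buf) =>
      if c = '+' then (acc ++ [PySem.Chars.strip buf], .start, []) else (acc, .norm, buf ++ [c])
  | (acc, st0, _) =>  -- START or AFTER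
      if c = '<' then (acc, .brack, [])
      else if c = '+' then (if st0 = .start then acc ++ [['+']] else acc, .start, [])
      else (acc, .norm, [c])

def pvFinishB (r : List (List Char) × PvState × List Char) : Option (List (List Char)) :=
  match r with
  | (_, .brack, _) => none  -- unclosed '<'
  | (acc, .norm, buf) => some (acc ++ [PySem.Chars.strip buf])
  | (acc, _, _) => some acc

def tokenize_shortcut_py_alt (shortcut : String) : Option (List String) :=
  match pvFinishB ((PySem.Chars.lower shortcut.toList).foldl pvStep ([], .start, [])) with
  | none => none
  | some ts => some (pvFinishTokens ts)

-- ===== PRECONDITION & SPEC =====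
def Spec_tokenize_shortcut_py (shortcut : String) (out : Option (List String)) : Prop := out = tokenize_shortcut_py_alt shortcut
instance (shortcut : String) (out : Option (List String)) : Decidable (Spec_tokenize_shortcut_py shortcut out) := by unfold Spec_tokenize_shortcut_py; infer_instance

-- ===== CLAIM (what is proved, stated in full; the proofs are below) =====
def Claim_equal_tokenize_shortcut_py : Prop := ∀ (shortcut : String), Dom_tokenize_shortcut_py shortcut → Spec_tokenize_shortcut_py shortcut (tokenize_shortcut_py shortcut)

-- ===== LEMMAS AND PROOFS =====

lemma pv_take_takeWhile {α : Type} (p : α → Bool) (l : List α) :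
    l.take ((l.takeWhile p).length) = l.takeWhile p := by
  induction l with
  | nil => rfl
  | cons a t ih =>
    by_cases hp : p a = true <;> simp [hp, ih]

lemma pv_drop_takeWhile {α : Type} (p : α → Bool) (l : List α) :
    l.drop ((l.takeWhile p).length) = l.dropWhile p := by
  induction l with
  | nil => rfl
  | cons a t ih =>
    by_cases hp : p a = true <;> simp [hp, ih]

-- characterisation of str.find for a single-character needle
lemma pv_find_go_singleton (c : Char) (l : List Char) (k : Nat) :
    PySem.Chars.find.go [c] l k =
      if c ∈ l then ((k : Int) + ((l.takeWhile (fun x => x ≠ c)).length : Int)) else -1 := by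
  induction l generalizing k with
  | nil => simp [PySem.Chars.find.go]
  | cons a t ih =>
    rw [PySem.Chars.find.go]
    by_cases hac : a = c
    · subst hac
      simp [List.isPrefixOf]
    · have : ([c].isPrefixOf (a :: t)) = false := by
        simp [List.isPrefixOf]; exact fun h => absurd h.symm hac
      rw [this]
      simp only [Bool.false_eq_true, if_false, ih]
      by_cases hm : c ∈ t
      · simp [hm, Ne.symm hac, hac]
        omega
      · simp [hm, Ne.symm hac]

lemma pv_find_singleton (c : Char) (l : List Char) :
    PySem.Chars.find l [c] =
      if c ∈ l then (((l.takeWhile (fun x => x ≠ c)).length : Int)) else -1 := by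
  rw [PySem.Chars.find, pv_find_go_singleton]
  simp

-- a NORM run of the state machine
lemma pv_fold_norm (t : List Char) (acc : List (List Char)) (buf : List Char) :
    List.foldl pvStep (acc, PvState.norm, buf) t =
      if '+' ∈ t then
        List.foldl pvStep (acc ++ [PySem.Chars.strip (buf ++ t.takeWhile (fun x => x ≠ '+'))], PvState.start, [])
          ((t.dropWhile (fun x => x ≠ '+')).tail)
      else (acc, PvState.norm, buf ++ t) := by
  induction t generalizing acc buf with
  | nil => simp
  | cons a r ih =>
    simp only [List.foldl_cons]
    by_cases ha : a = '+'
    · subst ha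
      simp [pvStep]
    · rw [show pvStep (acc, PvState.norm, buf) a = (acc, PvState.norm, buf ++ [a]) by simp [pvStep, ha]]
      rw [ih]
      simp [ha, Ne.symm ha]

-- a BRACK run of the state machine
lemma pv_fold_brack (t : List Char) (acc : List (List Char)) (buf : List Char) :
    List.foldl pvStep (acc, PvState.brack, buf) t =
      if '>' ∈ t then
        List.foldl pvStep (acc ++ [PySem.Chars.strip (buf ++ t.takeWhile (fun x => x ≠ '>'))], PvState.after, [])
          ((t.dropWhile (fun x => x ≠ '>')).tail)
      else (acc, PvState.brack, buf ++ t) := by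
  induction t generalizing acc buf with
  | nil => simp
  | cons a r ih =>
    simp only [List.foldl_cons]
    by_cases ha : a = '>'
    · subst ha
      simp [pvStep]
    · rw [show pvStep (acc, PvState.brack, buf) a = (acc, PvState.brack, buf ++ [a]) by simp [pvStep, ha]]
      rw [ih]
      simp [ha, Ne.symm ha]

-- after '>' one '+' is a separator: it only resets the state
lemma pv_step_after_plus (acc : List (List Char)) (buf : List Char) :
    pvStep (acc, PvState.after, buf) '+' = (acc, PvState.start, []) := rfl

-- START and AFTER transition identically on everything but '+'
lemma pv_step_start_after (acc : List (List Char)) (buf buf' : List Char) (c : Char) (hc : c ≠ '+') :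
    pvStep (acc, PvState.after, buf) c = pvStep (acc, PvState.start, buf') c := by
  simp [pvStep, hc]

-- a run that contains a stopper ends strictly inside the list
lemma pv_takeWhile_lt {α : Type} (p : α → Bool) (l : List α) (x : α) (hx : x ∈ l)
    (hp : p x = false) : (l.takeWhile p).length < l.length := by
  have h1 := List.takeWhile_append_dropWhile (p := p) (l := l)
  have h2 : l.dropWhile p ≠ [] := by
    rw [Ne, List.dropWhile_eq_nil_iff]
    intro hall
    exact absurd (hall x hx) (by simp [hp])
  have h3 : (l.takeWhile p).length + (l.dropWhile p).length = l.length := by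
    rw [← List.length_append, h1]
  have h4 : 0 < (l.dropWhile p).length := List.length_pos_iff.mpr h2
  omega

-- main invariant: A's loop from index i = the state machine run over the suffix, from a boundary
lemma pv_loopA_eq (n : Nat) : ∀ (s : List Char) (i : Nat) (acc : List (List Char)),
    i ≤ s.length → s.length - i ≤ n →
    pyLoopA s i acc = pvFinishB (List.foldl pvStep (acc, PvState.start, []) (s.drop i)) := by
  induction n with
  | zero =>
    intro s i acc hi hn
    have hie : i = s.length := by omega
    rw [pyLoopA, dif_neg (by omega)]
    rw [List.drop_eq_nil_of_le (by omega)]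
    rfl
  | succ n ih =>
    intro s i acc hi hn
    by_cases h : i < s.length
    · have hdrop : s.drop i = s[i] :: s.drop (i + 1) := List.drop_eq_getElem_cons h
      rw [pyLoopA, dif_pos h, hdrop, List.foldl_cons]
      by_cases hlt : s[i] = '<'
      · -- bracketed token
        rw [if_pos hlt]
        rw [show pvStep (acc, PvState.start, []) s[i] = (acc, PvState.brack, []) by
          simp [pvStep, hlt]]
        have hfind := pv_find_singleton '>' (s.drop i)
        rw [hdrop] at hfind
        rw [pv_fold_brack]
        by_cases hm : '>' ∈ s.drop (i + 1)
        · -- closing '>' exists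
          have hin : '>' ∈ s[i] :: s.drop (i + 1) := List.mem_cons_of_mem _ hm
          have htw : List.takeWhile (fun x => x ≠ '>') (s[i] :: s.drop (i + 1))
              = s[i] :: List.takeWhile (fun x => x ≠ '>') (s.drop (i + 1)) := by
            simp [hlt]
          have hklt : (List.takeWhile (fun x => x ≠ '>') (s.drop (i + 1))).length
              < (s.drop (i + 1)).length :=
            pv_takeWhile_lt _ _ _ hm (by simp)
          have hlen : (s.drop (i + 1)).length = s.length - (i + 1) := List.length_drop ..
          have hff : PySem.Chars.findFrom s ['>'] (i : Int) none
              = ((i + 1 + (List.takeWhile (fun x => x ≠ '>') (s.drop (i + 1))).length : Nat) : Int) := by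
            rw [PySem.Chars.findFrom_natCast s ['>'] i (Nat.le_of_lt h), hdrop, hfind,
              if_pos hin, htw, List.length_cons]
            rw [if_neg (by push_cast; omega)]
            push_cast
            omega
          rw [dif_neg (by rw [hff]; push_cast; omega), hff, if_pos hm, Int.toNat_natCast]
          rw [show (i : Int) + 1 = ((i + 1 : Nat) : Int) by push_cast; ring,
            PySem.List.slice_natCast]
          rw [show i + 1 + (List.takeWhile (fun x => x ≠ '>') (s.drop (i + 1))).length - (i + 1)
              = (List.takeWhile (fun x => x ≠ '>') (s.drop (i + 1))).length by omega]
          rw [pv_take_takeWhile]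
          have hdd : s.drop (i + 1 + (List.takeWhile (fun x => x ≠ '>') (s.drop (i + 1))).length + 1)
              = (List.dropWhile (fun x => x ≠ '>') (s.drop (i + 1))).tail := by
            rw [← pv_drop_takeWhile (fun x => x ≠ '>') (s.drop (i + 1)), List.tail_drop,
              List.drop_drop, Nat.add_assoc]
          by_cases h2 : i + 1 + (List.takeWhile (fun x => x ≠ '>') (s.drop (i + 1))).length + 1 < s.length
          · have hu : s.drop (i + 1 + (List.takeWhile (fun x => x ≠ '>') (s.drop (i + 1))).length + 1)
                = s[i + 1 + (List.takeWhile (fun x => x ≠ '>') (s.drop (i + 1))).length + 1]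
                  :: s.drop (i + 1 + (List.takeWhile (fun x => x ≠ '>') (s.drop (i + 1))).length + 1 + 1) :=
              List.drop_eq_getElem_cons h2
            rw [dif_pos h2, ← hdd, hu, List.foldl_cons]
            by_cases hp2 : s[i + 1 + (List.takeWhile (fun x => x ≠ '>') (s.drop (i + 1))).length + 1] = '+'
            · rw [hp2, if_pos rfl, pv_step_after_plus]
              exact ih s _ _ (by omega) (by omega)
            · rw [if_neg hp2, pv_step_start_after _ _ [] _ hp2]
              rw [ih s _ _ (by omega) (by omega), hu, List.foldl_cons]
              simp only [List.nil_append]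
          · have hnil : s.drop (i + 1 + (List.takeWhile (fun x => x ≠ '>') (s.drop (i + 1))).length + 1)
                = ([] : List Char) := List.drop_eq_nil_of_le (by omega)
            rw [dif_neg h2, pyLoopA, dif_neg h2, ← hdd, hnil]
            rfl
        · -- unclosed '<': both sides give none
          have hnotin : ¬('>' ∈ s[i] :: s.drop (i + 1)) := by
            simp only [List.mem_cons, not_or]
            exact ⟨fun he => by simp [hlt] at he, hm⟩
          have hf1 : PySem.Chars.find (s[i] :: s.drop (i + 1)) ['>'] = -1 := by
            rw [hfind, if_neg hnotin]
          rw [dif_pos (by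
            rw [PySem.Chars.findFrom_natCast s ['>'] i (Nat.le_of_lt h), hdrop, hf1]
            simp)]
          rw [if_neg hm]
          rfl
      · rw [if_neg hlt]
        by_cases hp : s[i] = '+'
        · -- literal '+' key
          rw [if_pos hp]
          rw [show pvStep (acc, PvState.start, []) s[i] = (acc ++ [['+']], PvState.start, []) by
            simp [pvStep, hp]]
          exact ih s (i + 1) (acc ++ [['+']]) (by omega) (by omega)
        · -- plain run
          rw [if_neg hp]
          rw [show pvStep (acc, PvState.start, []) s[i] = (acc, PvState.norm, [s[i]]) by
            simp [pvStep, hlt, hp]]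
          have hfind := pv_find_singleton '+' (s.drop i)
          rw [hdrop] at hfind
          rw [pv_fold_norm]
          by_cases hm : '+' ∈ s.drop (i + 1)
          · -- separator exists: emit the run, continue after it
            have hin : '+' ∈ s[i] :: s.drop (i + 1) := List.mem_cons_of_mem _ hm
            have htw : List.takeWhile (fun x => x ≠ '+') (s[i] :: s.drop (i + 1))
                = s[i] :: List.takeWhile (fun x => x ≠ '+') (s.drop (i + 1)) := by
              rw [List.takeWhile_cons, if_pos (by simp [hp])]
            have hklt : (List.takeWhile (fun x => x ≠ '+') (s.drop (i + 1))).length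
                < (s.drop (i + 1)).length :=
              pv_takeWhile_lt _ _ _ hm (by simp)
            have hlen : (s.drop (i + 1)).length = s.length - (i + 1) := List.length_drop ..
            have hff : PySem.Chars.findFrom s ['+'] (i : Int) none
                = ((i + 1 + (List.takeWhile (fun x => x ≠ '+') (s.drop (i + 1))).length : Nat) : Int) := by
              rw [PySem.Chars.findFrom_natCast s ['+'] i (Nat.le_of_lt h), hdrop, hfind,
                if_pos hin, htw, List.length_cons]
              rw [if_neg (by push_cast; omega)]
              push_cast
              omega
            rw [dif_neg (by rw [hff]; push_cast; omega), hff, if_pos hm, Int.toNat_natCast,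
              PySem.List.slice_natCast]
            rw [show i + 1 + (List.takeWhile (fun x => x ≠ '+') (s.drop (i + 1))).length - i
                = (List.takeWhile (fun x => x ≠ '+') (s.drop (i + 1))).length + 1 by omega]
            rw [hdrop, List.take_succ_cons, pv_take_takeWhile]
            have hdd : s.drop (i + 1 + (List.takeWhile (fun x => x ≠ '+') (s.drop (i + 1))).length + 1)
                = (List.dropWhile (fun x => x ≠ '+') (s.drop (i + 1))).tail := by
              rw [← pv_drop_takeWhile (fun x => x ≠ '+') (s.drop (i + 1)), List.tail_drop,
                List.drop_drop, Nat.add_assoc]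
            rw [ih s (i + 1 + (List.takeWhile (fun x => x ≠ '+') (s.drop (i + 1))).length + 1) _
              (by omega) (by omega), hdd]
            simp only [List.singleton_append]
          · -- no separator: final token, loop breaks
            have hnotin : ¬('+' ∈ s[i] :: s.drop (i + 1)) := by
              simp only [List.mem_cons, not_or]
              exact ⟨fun he => hp he.symm, hm⟩
            have hf1 : PySem.Chars.find (s[i] :: s.drop (i + 1)) ['+'] = -1 := by
              rw [hfind, if_neg hnotin]
            rw [dif_pos (by
              rw [PySem.Chars.findFrom_natCast s ['+'] i (Nat.le_of_lt h), hdrop, hf1]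
              simp)]
            rw [if_neg hm]
            rw [PySem.List.slice_from_natCast, hdrop]
            rfl
    · rw [pyLoopA, dif_neg h]
      rw [List.drop_eq_nil_of_le (by omega)]
      rfl

-- ===== VERDICT (by name: the statement is the Claim_ definition above) =====
theorem tokenize_shortcut_py_spec : Claim_equal_tokenize_shortcut_py := by
  intro shortcut _
  unfold Spec_tokenize_shortcut_py tokenize_shortcut_py tokenize_shortcut_py_alt
  have h := pv_loopA_eq (PySem.Chars.lower shortcut.toList).length
    (PySem.Chars.lower shortcut.toList) 0 [] (Nat.zero_le _) (by omega)
  simp only [List.drop_zero] at h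
  rw [h]
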